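-- pv_equiv track=rewrite | github.com/maruthakumar/vertex_market_regime | backtester_v2/ui-centralized/strategies/market_regime/excel_structure_analyzer.py | categorize_parameters
-- ===== SOURCE A (Python) =====
-- from typing import Dict, List, Any, Optional
--
-- def categorize_parameters(headers: List[str], data: List[List[str]]) -> Dict[str, int]:
--     """Categorize parameters based on headers and data"""
--     categories = {
--         'weights': 0,
--         'thresholds': 0,
--         'timeframes': 0,
--         'indicators': 0,
--         'configuration': 0,
--         'validation': 0,
--         'other': 0
--     }
--
--     weight_keywords = ['weight', 'allocation', 'ratio', 'proportion']
--     threshold_keywords = ['threshold', 'limit', 'min', 'max', 'range']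
--     timeframe_keywords = ['timeframe', 'period', 'window', 'interval', 'time']
--     indicator_keywords = ['indicator', 'signal', 'analysis', 'calculation']
--     config_keywords = ['config', 'setting', 'parameter', 'option', 'enable']
--     validation_keywords = ['validation', 'check', 'verify', 'test', 'rule']
--
--     for header in headers:
--         if not header:
--             continue
--
--         header_lower = header.lower()
--         categorized = False
--
--         for keyword in weight_keywords:
--             if keyword in header_lower:
--                 categories['weights'] += 1
--                 categorized = True
--                 break
--
--         if not categorized:
--             for keyword in threshold_keywords:
--                 if keyword in header_lower:
--                     categories['thresholds'] += 1
--                     categorized = True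
--                     break
--
--         if not categorized:
--             for keyword in timeframe_keywords:
--                 if keyword in header_lower:
--                     categories['timeframes'] += 1
--                     categorized = True
--                     break
--
--         if not categorized:
--             for keyword in indicator_keywords:
--                 if keyword in header_lower:
--                     categories['indicators'] += 1
--                     categorized = True
--                     break
--
--         if not categorized:
--             for keyword in config_keywords:
--                 if keyword in header_lower:
--                     categories['configuration'] += 1
--                     categorized = True
--                     break
--
--         if not categorized:
--             for keyword in validation_keywords:
--                 if keyword in header_lower:
--                     categories['validation'] += 1
--                     categorized = True
--                     break
--
--         if not categorized:
--             categories['other'] += 1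
--
--     return categories
-- ===== SOURCE B (Python) =====
-- _CATEGORIES = [
--     ('weights', ['weight', 'allocation', 'ratio', 'proportion']),
--     ('thresholds', ['threshold', 'limit', 'min', 'max', 'range']),
--     ('timeframes', ['timeframe', 'period', 'window', 'interval', 'time']),
--     ('indicators', ['indicator', 'signal', 'analysis', 'calculation']),
--     ('configuration', ['config', 'setting', 'parameter', 'option', 'enable']),
--     ('validation', ['validation', 'check', 'verify', 'test', 'rule']),
-- ]
--
-- def categorize_parameters(headers, data):
--     # Staged sieve: per-category passes over a shrinking pool of headers,
--     # counting each stage's catch as the drop in pool size.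
--     remaining = [h.lower() for h in headers if h]
--     counts = {}
--     for cat, kws in _CATEGORIES:
--         rest = [h for h in remaining if not any(k in h for k in kws)]
--         counts[cat] = len(remaining) - len(rest)
--         remaining = rest
--     counts['other'] = len(remaining)
--     return counts
-- ===== Notes on version B (the rewrite author's own statement) =====
-- stated objective: alternative
-- what changed: Replaces A's per-header classification (six nested keyword loops with a 'categorized' flag) by a staged sieve: one whole-list filtering pass per category over a shrinking pool of lowercased headers, each category's count being the drop in pool length.
import Mathlib
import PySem

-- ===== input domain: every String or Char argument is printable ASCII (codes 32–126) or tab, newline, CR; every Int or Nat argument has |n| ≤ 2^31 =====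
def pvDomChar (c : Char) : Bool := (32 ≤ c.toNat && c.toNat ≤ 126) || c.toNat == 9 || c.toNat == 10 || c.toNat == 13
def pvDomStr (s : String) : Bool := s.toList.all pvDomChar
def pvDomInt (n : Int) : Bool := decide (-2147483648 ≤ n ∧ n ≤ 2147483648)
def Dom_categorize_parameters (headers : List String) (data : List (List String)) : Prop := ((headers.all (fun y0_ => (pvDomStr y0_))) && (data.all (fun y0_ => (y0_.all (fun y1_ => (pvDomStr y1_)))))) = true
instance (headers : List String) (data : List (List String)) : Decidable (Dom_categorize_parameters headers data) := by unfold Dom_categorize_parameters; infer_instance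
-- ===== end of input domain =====

-- ===== PORT A =====
-- B replaces A's per-header classification (six nested keyword loops + 'categorized' flag)
-- with a staged sieve: one whole-list filtering pass per category over a shrinking pool.

def pvWeightKw : List String := ["weight", "allocation", "ratio", "proportion"]
def pvThresholdKw : List String := ["threshold", "limit", "min", "max", "range"]
def pvTimeframeKw : List String := ["timeframe", "period", "window", "interval", "time"]
def pvIndicatorKw : List String := ["indicator", "signal", "analysis", "calculation"]
def pvConfigKw : List String := ["config", "setting", "parameter", "option", "enable"]
def pvValidationKw : List String := ["validation", "check", "verify", "test", "rule"]

def pvInitCats : PySem.Dict String Int :=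
  PySem.Dict.ofList [("weights", 0), ("thresholds", 0), ("timeframes", 0),
    ("indicators", 0), ("configuration", 0), ("validation", 0), ("other", 0)]

-- 'for keyword in kws: if keyword in header_lower: cats[key] += 1; categorized = True; break'
def pvScanInc (kws : List String) (hl : String) (d : PySem.Dict String Int) (key : String) :
    PySem.Dict String Int × Bool :=
  match kws with
  | [] => (d, false)
  | k :: rest =>
      if PySem.Str.isIn k hl then (d.modify key 0 (· + 1), true)
      else pvScanInc rest hl d key

def pvStepA (d : PySem.Dict String Int) (header : String) : PySem.Dict String Int :=
  if header = "" then d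
  else
    let hl := PySem.Str.lower header
    let (d, c) := pvScanInc pvWeightKw hl d "weights"
    if c then d else
    let (d, c) := pvScanInc pvThresholdKw hl d "thresholds"
    if c then d else
    let (d, c) := pvScanInc pvTimeframeKw hl d "timeframes"
    if c then d else
    let (d, c) := pvScanInc pvIndicatorKw hl d "indicators"
    if c then d else
    let (d, c) := pvScanInc pvConfigKw hl d "configuration"
    if c then d else
    let (d, c) := pvScanInc pvValidationKw hl d "validation"
    if c then d else
    d.modify "other" 0 (· + 1)

def categorize_parameters (headers : List String) (data : List (List String)) : List (String × Int) :=
  (headers.foldl pvStepA pvInitCats).items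

-- ===== PORT B =====
def pvCategories : List (String × List String) :=
  [("weights", ["weight", "allocation", "ratio", "proportion"]),
   ("thresholds", ["threshold", "limit", "min", "max", "range"]),
   ("timeframes", ["timeframe", "period", "window", "interval", "time"]),
   ("indicators", ["indicator", "signal", "analysis", "calculation"]),
   ("configuration", ["config", "setting", "parameter", "option", "enable"]),
   ("validation", ["validation", "check", "verify", "test", "rule"])]

-- 'any(k in h for k in kws)'
def pvMatches (kws : List String) (h : String) : Bool := kws.any (fun k => PySem.Str.isIn k h)

-- one stage of the sieve: count the catch as the drop in pool length, keep the rest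
def pvStageB (acc : PySem.Dict String Int × List String) (p : String × List String) :
    PySem.Dict String Int × List String :=
  let rest := acc.2.filter (fun h => !pvMatches p.2 h)
  (acc.1.insert p.1 ((acc.2.length : Int) - (rest.length : Int)), rest)

def categorize_parameters_alt (headers : List String) (data : List (List String)) : List (String × Int) :=
  let remaining := (headers.filter (fun h => !(h == ""))).map PySem.Str.lower
  let r := pvCategories.foldl pvStageB (PySem.Dict.empty, remaining)
  (r.1.insert "other" (r.2.length : Int)).items

-- ===== PRECONDITION & SPEC =====
def Spec_categorize_parameters (headers : List String) (data : List (List String)) (out : List (String × Int)) : Prop := out = categorize_parameters_alt headers data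
instance (headers : List String) (data : List (List String)) (out : List (String × Int)) : Decidable (Spec_categorize_parameters headers data out) := by unfold Spec_categorize_parameters; infer_instance

-- ===== CLAIM (what is proved, stated in full; the proofs are below) =====
def Claim_equal_categorize_parameters : Prop := ∀ (headers : List String) (data : List (List String)), Dom_categorize_parameters headers data → Spec_categorize_parameters headers data (categorize_parameters headers data)

-- ===== LEMMAS AND PROOFS =====

-- proof-only classifier: the first category whose keywords match, else "other"
def pvClassify (hl : String) : String :=
  if pvMatches pvWeightKw hl then "weights"
  else if pvMatches pvThresholdKw hl then "thresholds"
  else if pvMatches pvTimeframeKw hl then "timeframes"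
  else if pvMatches pvIndicatorKw hl then "indicators"
  else if pvMatches pvConfigKw hl then "configuration"
  else if pvMatches pvValidationKw hl then "validation"
  else "other"

lemma pvScanInc_eq (kws : List String) (hl : String) (d : PySem.Dict String Int) (key : String) :
    pvScanInc kws hl d key =
      if pvMatches kws hl then (d.modify key 0 (· + 1), true) else (d, false) := by
  induction kws with
  | nil => simp [pvScanInc, pvMatches]
  | cons k rest ih =>
      simp only [pvScanInc, pvMatches, List.any_cons, ih, Bool.or_eq_true]
      by_cases h : PySem.Chars.isIn k.toList hl.toList = true <;> simp [h]

lemma pvStepA_eq (d : PySem.Dict String Int) (header : String) :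
    pvStepA d header =
      if header = "" then d
      else d.modify (pvClassify (PySem.Str.lower header)) 0 (· + 1) := by
  unfold pvStepA pvClassify
  by_cases hh : header = ""
  · simp [hh]
  · rw [if_neg hh, if_neg hh]
    generalize PySem.Str.lower header = hl
    simp only [pvScanInc_eq]
    by_cases h1 : pvMatches pvWeightKw hl = true <;>
    by_cases h2 : pvMatches pvThresholdKw hl = true <;>
    by_cases h3 : pvMatches pvTimeframeKw hl = true <;>
    by_cases h4 : pvMatches pvIndicatorKw hl = true <;>
    by_cases h5 : pvMatches pvConfigKw hl = true <;>
    by_cases h6 : pvMatches pvValidationKw hl = true <;>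
    simp [h1, h2, h3, h4, h5, h6]

lemma pvFoldA_eq (headers : List String) (d : PySem.Dict String Int) :
    headers.foldl pvStepA d =
      (((headers.filter (fun h => !(h == ""))).map PySem.Str.lower).map pvClassify).foldl
        (fun d k => d.modify k 0 (· + 1)) d := by
  induction headers generalizing d with
  | nil => rfl
  | cons h t ih =>
      by_cases hh : h = ""
      · simp [hh, pvStepA_eq, ih]
      · simp [hh, pvStepA_eq, ih]

lemma pvClassify_mem (hl : String) :
    pvClassify hl ∈ ["weights", "thresholds", "timeframes", "indicators", "configuration", "validation", "other"] := by
  unfold pvClassify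
  split_ifs <;> simp

-- length drop of one sieve stage = count of matches in the pool
lemma pvLenDrop (p : String → Bool) (l : List String) :
    (l.length : Int) - ((l.filter (fun h => !p h)).length : Int) = (l.countP p : Int) := by
  induction l with
  | nil => simp
  | cons x t ih =>
      by_cases hx : p x = true <;> simp [hx] <;> omega

lemma pvCountClassify (l : List String) (p : String → Bool) (c : String)
    (hpc : ∀ h, p h = (pvClassify h == c)) :
    (l.countP p : Int) = ((l.map pvClassify).count c : Int) := by
  have : l.countP p = (l.map pvClassify).count c := by
    rw [List.count_eq_countP, List.countP_map]
    exact List.countP_congr (fun h _ => by rw [hpc]; rfl)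
  rw [this]

-- A's folded dict has the seven keys in the initial order, each mapped to its classify-count
lemma pvFoldA_items_gen (cs : List String)
    (hmem : ∀ c ∈ cs, c ∈ ["weights", "thresholds", "timeframes", "indicators", "configuration", "validation", "other"])
    (a1 a2 a3 a4 a5 a6 a7 : Int) :
    (cs.foldl (fun d k => d.modify k 0 (· + 1))
      (PySem.Dict.mk [("weights", a1), ("thresholds", a2), ("timeframes", a3),
        ("indicators", a4), ("configuration", a5), ("validation", a6), ("other", a7)])).items =
      [("weights", a1 + (cs.count "weights" : Int)), ("thresholds", a2 + (cs.count "thresholds" : Int)),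
       ("timeframes", a3 + (cs.count "timeframes" : Int)), ("indicators", a4 + (cs.count "indicators" : Int)),
       ("configuration", a5 + (cs.count "configuration" : Int)), ("validation", a6 + (cs.count "validation" : Int)),
       ("other", a7 + (cs.count "other" : Int))] := by
  induction cs generalizing a1 a2 a3 a4 a5 a6 a7 with
  | nil => simp
  | cons c t ih =>
      have hc := hmem c (by simp)
      have hmem' : ∀ c ∈ t, c ∈ ["weights", "thresholds", "timeframes", "indicators", "configuration", "validation", "other"] :=
        fun c hct => hmem c (by simp [hct])
      simp only [List.foldl_cons]
      fin_cases hc <;>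
      · have ih' := ih hmem'
        simp only [PySem.Dict.modify, PySem.Dict.insert, PySem.Dict.getD, PySem.Dict.get?_mk_cons,
          PySem.Dict.contains_mk] at ih' ⊢
        norm_num [List.count_cons] at ih' ⊢
        try simp only [String.reduceEq, reduceIte]
        rw [ih']
        simp only [List.cons.injEq, Prod.mk.injEq]
        norm_num
        try omega

lemma pvPoint1 (h : String) :
    pvMatches pvWeightKw h = (pvClassify h == "weights") := by
  unfold pvClassify
  by_cases h1 : pvMatches pvWeightKw h = true <;>
  by_cases h2 : pvMatches pvThresholdKw h = true <;>
  by_cases h3 : pvMatches pvTimeframeKw h = true <;>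
  by_cases h4 : pvMatches pvIndicatorKw h = true <;>
  by_cases h5 : pvMatches pvConfigKw h = true <;>
  by_cases h6 : pvMatches pvValidationKw h = true <;>
  simp [h1, h2, h3, h4, h5, h6]

lemma pvPoint2 (h : String) :
    (pvMatches pvThresholdKw h && !pvMatches pvWeightKw h) = (pvClassify h == "thresholds") := by
  unfold pvClassify
  by_cases h1 : pvMatches pvWeightKw h = true <;>
  by_cases h2 : pvMatches pvThresholdKw h = true <;>
  by_cases h3 : pvMatches pvTimeframeKw h = true <;>
  by_cases h4 : pvMatches pvIndicatorKw h = true <;>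
  by_cases h5 : pvMatches pvConfigKw h = true <;>
  by_cases h6 : pvMatches pvValidationKw h = true <;>
  simp [h1, h2, h3, h4, h5, h6]

lemma pvPoint3 (h : String) :
    ((pvMatches pvTimeframeKw h && !pvMatches pvThresholdKw h) && !pvMatches pvWeightKw h) = (pvClassify h == "timeframes") := by
  unfold pvClassify
  by_cases h1 : pvMatches pvWeightKw h = true <;>
  by_cases h2 : pvMatches pvThresholdKw h = true <;>
  by_cases h3 : pvMatches pvTimeframeKw h = true <;>
  by_cases h4 : pvMatches pvIndicatorKw h = true <;>
  by_cases h5 : pvMatches pvConfigKw h = true <;>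
  by_cases h6 : pvMatches pvValidationKw h = true <;>
  simp [h1, h2, h3, h4, h5, h6]

lemma pvPoint4 (h : String) :
    (((pvMatches pvIndicatorKw h && !pvMatches pvTimeframeKw h) && !pvMatches pvThresholdKw h) && !pvMatches pvWeightKw h) = (pvClassify h == "indicators") := by
  unfold pvClassify
  by_cases h1 : pvMatches pvWeightKw h = true <;>
  by_cases h2 : pvMatches pvThresholdKw h = true <;>
  by_cases h3 : pvMatches pvTimeframeKw h = true <;>
  by_cases h4 : pvMatches pvIndicatorKw h = true <;>
  by_cases h5 : pvMatches pvConfigKw h = true <;>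
  by_cases h6 : pvMatches pvValidationKw h = true <;>
  simp [h1, h2, h3, h4, h5, h6]

lemma pvPoint5 (h : String) :
    ((((pvMatches pvConfigKw h && !pvMatches pvIndicatorKw h) && !pvMatches pvTimeframeKw h) && !pvMatches pvThresholdKw h) && !pvMatches pvWeightKw h) = (pvClassify h == "configuration") := by
  unfold pvClassify
  by_cases h1 : pvMatches pvWeightKw h = true <;>
  by_cases h2 : pvMatches pvThresholdKw h = true <;>
  by_cases h3 : pvMatches pvTimeframeKw h = true <;>
  by_cases h4 : pvMatches pvIndicatorKw h = true <;>
  by_cases h5 : pvMatches pvConfigKw h = true <;>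
  by_cases h6 : pvMatches pvValidationKw h = true <;>
  simp [h1, h2, h3, h4, h5, h6]

lemma pvPoint6 (h : String) :
    (((((pvMatches pvValidationKw h && !pvMatches pvConfigKw h) && !pvMatches pvIndicatorKw h) && !pvMatches pvTimeframeKw h) && !pvMatches pvThresholdKw h) && !pvMatches pvWeightKw h) = (pvClassify h == "validation") := by
  unfold pvClassify
  by_cases h1 : pvMatches pvWeightKw h = true <;>
  by_cases h2 : pvMatches pvThresholdKw h = true <;>
  by_cases h3 : pvMatches pvTimeframeKw h = true <;>
  by_cases h4 : pvMatches pvIndicatorKw h = true <;>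
  by_cases h5 : pvMatches pvConfigKw h = true <;>
  by_cases h6 : pvMatches pvValidationKw h = true <;>
  simp [h1, h2, h3, h4, h5, h6]

lemma pvPoint7 (h : String) :
    (((((!pvMatches pvValidationKw h && !pvMatches pvConfigKw h) && !pvMatches pvIndicatorKw h) && !pvMatches pvTimeframeKw h) && !pvMatches pvThresholdKw h) && !pvMatches pvWeightKw h) = (pvClassify h == "other") := by
  unfold pvClassify
  by_cases h1 : pvMatches pvWeightKw h = true <;>
  by_cases h2 : pvMatches pvThresholdKw h = true <;>
  by_cases h3 : pvMatches pvTimeframeKw h = true <;>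
  by_cases h4 : pvMatches pvIndicatorKw h = true <;>
  by_cases h5 : pvMatches pvConfigKw h = true <;>
  by_cases h6 : pvMatches pvValidationKw h = true <;>
  simp [h1, h2, h3, h4, h5, h6]

lemma pvB_items (v1 v2 v3 v4 v5 v6 v7 : Int) :
    ((((((((PySem.Dict.empty.insert "weights" v1).insert "thresholds" v2).insert "timeframes" v3).insert
        "indicators" v4).insert "configuration" v5).insert "validation" v6).insert "other" v7)).items =
      [("weights", v1), ("thresholds", v2), ("timeframes", v3), ("indicators", v4),
       ("configuration", v5), ("validation", v6), ("other", v7)] := by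
  simp [PySem.Dict.insert, PySem.Dict.empty]

-- ===== VERDICT (by name: the statement is the Claim_ definition above) =====
theorem categorize_parameters_spec : Claim_equal_categorize_parameters := by
  intro headers data _
  unfold Spec_categorize_parameters categorize_parameters categorize_parameters_alt
  rw [pvFoldA_eq]
  generalize hlows : (headers.filter (fun h => !(h == ""))).map PySem.Str.lower = lows
  have hmem : ∀ c ∈ lows.map pvClassify,
      c ∈ ["weights", "thresholds", "timeframes", "indicators", "configuration", "validation", "other"] := by
    intro c hc
    obtain ⟨h, _, rfl⟩ := List.mem_map.mp hc
    exact pvClassify_mem h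
  have hinit : pvInitCats = PySem.Dict.mk [("weights", 0), ("thresholds", 0), ("timeframes", 0),
      ("indicators", 0), ("configuration", 0), ("validation", 0), ("other", 0)] := by decide
  rw [hinit, pvFoldA_items_gen _ hmem]
  simp only [pvCategories, List.foldl_cons, List.foldl_nil, pvStageB,
    show (["weight", "allocation", "ratio", "proportion"] : List String) = pvWeightKw from rfl,
    show (["threshold", "limit", "min", "max", "range"] : List String) = pvThresholdKw from rfl,
    show (["timeframe", "period", "window", "interval", "time"] : List String) = pvTimeframeKw from rfl,
    show (["indicator", "signal", "analysis", "calculation"] : List String) = pvIndicatorKw from rfl,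
    show (["config", "setting", "parameter", "option", "enable"] : List String) = pvConfigKw from rfl,
    show (["validation", "check", "verify", "test", "rule"] : List String) = pvValidationKw from rfl]
  rw [pvB_items]
  simp only [zero_add, List.cons.injEq, Prod.mk.injEq, true_and, and_true]
  refine ⟨?_, ?_, ?_, ?_, ?_, ?_, ?_⟩
  · rw [pvLenDrop, pvCountClassify _ _ _ pvPoint1]
  · rw [pvLenDrop]; simp only [List.countP_filter]; rw [pvCountClassify _ _ _ pvPoint2]
  · rw [pvLenDrop]; simp only [List.countP_filter]; rw [pvCountClassify _ _ _ pvPoint3]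
  · rw [pvLenDrop]; simp only [List.countP_filter]; rw [pvCountClassify _ _ _ pvPoint4]
  · rw [pvLenDrop]; simp only [List.countP_filter]; rw [pvCountClassify _ _ _ pvPoint5]
  · rw [pvLenDrop]; simp only [List.countP_filter]; rw [pvCountClassify _ _ _ pvPoint6]
  · rw [← List.countP_eq_length_filter]; simp only [List.countP_filter]; rw [pvCountClassify _ _ _ pvPoint7]
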